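-- pv_equiv track=rewrite | github.com/Ehaschia/DiscourseDependencyParsing | ncrfae/model/utility.py | construct_batches_by_length
-- ===== SOURCE A (Python) =====
-- from itertools import groupby
--
-- def construct_batches_by_length(data_set, batch_size):
--     data_set = sorted(data_set, key=lambda s: len(s))
--     grouped = [list(g) for k, g in groupby(data_set, lambda s: len(s))]
--     batch_data = []
--     for group in grouped:
--         sub_batch_data = get_batch_data(group, batch_size)
--         batch_data.extend(sub_batch_data)
--     return batch_data
--
-- def get_batch_data(data_set, batch_size):
--     batch_data = []
--     len_data = len(data_set)
--     num_batch = len_data // batch_size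
--     if not len_data % batch_size == 0:
--         num_batch += 1
--
--     for i in range(num_batch):
--         start_idx = i * batch_size
--         end_idx = min(len_data, (i + 1) * batch_size)
--         batch_data.append(data_set[start_idx:end_idx])
--     return batch_data
-- ===== SOURCE B (Python) =====
-- def construct_batches_by_length(data_set, batch_size):
--     buckets = {}
--     for s in data_set:
--         buckets[len(s)] = buckets.get(len(s), []) + [s]
--     batch_data = []
--     for k in sorted(buckets):
--         bucket = buckets[k]
--         for i in range(0, len(bucket), batch_size):
--             batch_data.append(bucket[i:i + batch_size])
--     return batch_data
-- ===== Notes on version B (the rewrite author's own statement) =====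
-- stated objective: alternative
-- what changed: B replaces A's full stable sort of the dataset plus itertools.groupby with a single bucketing pass into a dict keyed by length, then iterates the sorted distinct lengths and chunks each bucket with range(0, len(bucket), batch_size) slices instead of A's ceil-division batch-count loop.
import Mathlib
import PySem

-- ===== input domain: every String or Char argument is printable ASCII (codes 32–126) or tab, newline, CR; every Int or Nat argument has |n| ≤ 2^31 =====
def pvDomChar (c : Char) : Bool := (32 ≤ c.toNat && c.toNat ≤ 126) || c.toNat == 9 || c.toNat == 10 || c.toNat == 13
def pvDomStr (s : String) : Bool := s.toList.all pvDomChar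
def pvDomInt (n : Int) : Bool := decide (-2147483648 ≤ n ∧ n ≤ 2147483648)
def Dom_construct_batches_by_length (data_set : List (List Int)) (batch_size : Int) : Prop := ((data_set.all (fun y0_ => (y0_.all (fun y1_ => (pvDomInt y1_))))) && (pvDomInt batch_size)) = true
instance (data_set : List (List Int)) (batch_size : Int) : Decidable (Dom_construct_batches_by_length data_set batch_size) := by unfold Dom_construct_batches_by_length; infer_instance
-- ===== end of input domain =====

-- B buckets the dataset into a dict length -> list in one pass and chunks each bucket over
-- range(0, len(bucket), batch_size), instead of A's full stable sort + groupby + ceil-division batching.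

-- ===== PORT A =====
-- helper get_batch_data, transliterated
def get_batch_data (data_set : List (List Int)) (batch_size : Int) : List (List (List Int)) :=
  let len_data : Int := PySem.List.len data_set
  let num_batch0 : Int := PySem.Int.floordiv len_data batch_size
  let num_batch : Int := if ¬ (PySem.Int.mod len_data batch_size = 0) then num_batch0 + 1 else num_batch0
  (PySem.List.pyRange 0 num_batch 1).foldl
    (fun acc i =>
      acc ++ [PySem.List.slice data_set (some (i * batch_size)) (some (min len_data ((i + 1) * batch_size)))]) []

-- itertools.groupby(data_set, lambda s: len(s)) on the sorted list: consecutive runs of equal length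
def pvGroupBy (l : List (List Int)) : List (List (List Int)) :=
  match l with
  | [] => []
  | x :: xs =>
      (x :: xs.takeWhile (fun s => s.length == x.length)) ::
        pvGroupBy (xs.dropWhile (fun s => s.length == x.length))
  termination_by l.length
  decreasing_by
    simp only [List.length_cons]
    exact Nat.lt_succ_of_le (List.length_dropWhile_le _ _)

def construct_batches_by_length (data_set : List (List Int)) (batch_size : Int) : List (List (List Int)) :=
  let data_set' := PySem.List.sorted data_set (fun s => (s.length : Int))
  let grouped := pvGroupBy data_set'
  grouped.foldl (fun acc g => acc ++ get_batch_data g batch_size) []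

-- ===== PORT B =====
def construct_batches_by_length_alt (data_set : List (List Int)) (batch_size : Int) : List (List (List Int)) :=
  let buckets : PySem.Dict Int (List (List Int)) :=
    data_set.foldl (fun d s => d.modify ((s.length : Int)) [] (fun v => v ++ [s])) PySem.Dict.empty
  (PySem.List.sorted buckets.keys (fun k => k)).foldl
    (fun acc k =>
      -- buckets[k]: k is always a key of buckets, so getD's default is never used
      let bucket := buckets.getD k []
      (PySem.List.pyRange 0 (PySem.List.len bucket) batch_size).foldl
        (fun acc2 i => acc2 ++ [PySem.List.slice bucket (some i) (some (i + batch_size))]) acc) []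

-- ===== PRECONDITION & SPEC =====
-- batch_size = 0 makes A raise ZeroDivisionError as soon as there is a group (len_data // batch_size),
-- and B raise ValueError (range step 0); on an empty data_set neither loop body runs, so that case stays admitted.
def Pre_construct_batches_by_length (data_set : List (List Int)) (batch_size : Int) : Prop :=
  data_set = [] ∨ batch_size ≠ 0
instance (data_set : List (List Int)) (batch_size : Int) : Decidable (Pre_construct_batches_by_length data_set batch_size) := by
  unfold Pre_construct_batches_by_length; infer_instance

def pvWitness_construct_batches_by_length : List (List Int) × Int := ([[1], [2, 3], [4]], 2)

def Spec_construct_batches_by_length (data_set : List (List Int)) (batch_size : Int) (out : List (List (List Int))) : Prop := out = construct_batches_by_length_alt data_set batch_size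
instance (data_set : List (List Int)) (batch_size : Int) (out : List (List (List Int))) : Decidable (Spec_construct_batches_by_length data_set batch_size out) := by unfold Spec_construct_batches_by_length; infer_instance

-- ===== CLAIM (what is proved, stated in full; the proofs are below) =====
def Claim_equal_construct_batches_by_length : Prop := ∀ (data_set : List (List Int)) (batch_size : Int), Dom_construct_batches_by_length data_set batch_size → Pre_construct_batches_by_length data_set batch_size → Spec_construct_batches_by_length data_set batch_size (construct_batches_by_length data_set batch_size)

-- ===== LEMMAS AND PROOFS =====

-- the filter block of length-key k
def pvF (l : List (List Int)) (k : Int) : List (List Int) :=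
  l.filter (fun s => ((s.length : Int) == k))

-- B's chunking of one bucket
def pvChunkB (g : List (List Int)) (bs : Int) : List (List (List Int)) :=
  (PySem.List.pyRange 0 (PySem.List.len g) bs).map
    (fun i => PySem.List.slice g (some i) (some (i + bs)))

-- the sorted distinct keys
def pvK (l : List (List Int)) : List Int :=
  PySem.List.sorted (PySem.Set.ofList (l.map (fun s => (s.length : Int)))) (fun k => k)

theorem pvB_eq (l : List (List Int)) (bs : Int) :
    construct_batches_by_length_alt l bs = (pvK l).flatMap (fun k => pvChunkB (pvF l k) bs) := by
  have hkeys : (l.foldl (fun d s => d.modify ((s.length : Int)) [] (fun v => v ++ [s])) PySem.Dict.empty).keys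
      = PySem.Set.ofList (l.map (fun s => (s.length : Int))) := by
    rw [PySem.Dict.keys_foldl_modify_key l (fun s => ((s.length : Int))) [] (fun _ s v => v ++ [s])]
    rfl
  have hgetD : ∀ k, (l.foldl (fun d s => d.modify ((s.length : Int)) [] (fun v => v ++ [s])) PySem.Dict.empty).getD k []
      = pvF l k := by
    intro k
    rw [show (l.foldl (fun d s => d.modify ((s.length : Int)) [] (fun v => v ++ [s])) PySem.Dict.empty)
        = ((l.map (fun s => ((s.length : Int), s))).foldl
            (fun d p => d.modify p.1 [] (fun v => v ++ [p.2])) PySem.Dict.empty) from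
      (List.foldl_map (f := fun s : List Int => ((s.length : Int), s)) (g := fun (d : PySem.Dict Int (List (List Int))) p => d.modify p.1 [] (fun v => v ++ [p.2])) (l := l) (init := PySem.Dict.empty)).symm]
    rw [PySem.Dict.getD_foldl_modify_append]
    simp [pvF, List.filter_map, Function.comp_def]
  show (PySem.List.sorted _ (fun k => k)).foldl _ [] = _
  rw [hkeys]
  have hstep : (fun (acc : List (List (List Int))) (k : Int) =>
      (PySem.List.pyRange 0 (PySem.List.len ((l.foldl (fun d s => d.modify ((s.length : Int)) [] (fun v => v ++ [s])) PySem.Dict.empty).getD k [])) bs).foldl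
        (fun acc2 i => acc2 ++ [PySem.List.slice ((l.foldl (fun d s => d.modify ((s.length : Int)) [] (fun v => v ++ [s])) PySem.Dict.empty).getD k []) (some i) (some (i + bs))]) acc)
      = fun acc k => acc ++ pvChunkB (pvF l k) bs := by
    funext acc k
    rw [hgetD, PySem.List.foldl_append_singleton_eq_map, pvChunkB]
  rw [hstep, PySem.List.foldl_append_eq_flatMap, List.nil_append, pvK]

theorem pvInsertBy_skip {α : Type} (P : α → α → Bool) (x : α) (L1 L2 : List α)
    (h : ∀ y ∈ L1, P x y = false) :
    PySem.List.insertBy P x (L1 ++ L2) = L1 ++ PySem.List.insertBy P x L2 := by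
  induction L1 with
  | nil => simp
  | cons a L1 ih =>
      simp only [List.cons_append, PySem.List.insertBy]
      rw [h a (by simp), ih (fun y hy => h y (by simp [hy]))]
      simp


theorem pvInsertBy_head {α : Type} (P : α → α → Bool) (x : α) (L2 : List α)
    (h : ∀ y ∈ L2, P x y = true) :
    PySem.List.insertBy P x L2 = x :: L2 := by
  cases L2 with
  | nil => rfl
  | cons a L => simp only [PySem.List.insertBy, h a (by simp), if_pos]


theorem pvSorted_append_singleton {α : Type} (l : List α) (x : α) (key : α → Int) :
    PySem.List.sorted (l ++ [x]) key
      = PySem.List.insertBy (fun a b => decide (key a < key b)) x (PySem.List.sorted l key) := by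
  rw [PySem.List.sorted_eq_foldl_insertBy, PySem.List.sorted_eq_foldl_insertBy (xs := l),
    List.foldl_append]
  rfl


theorem pvInsert_mem {α : Type} (key : α → Int) (x : α) (k : Int) (hxk : key x = k)
    (K : List Int) (F F' : Int → List α)
    (hK : K.Pairwise (· < ·)) (hk : k ∈ K)
    (hFkey : ∀ k' y, y ∈ F k' → key y = k')
    (hF' : ∀ k', k' ≠ k → F' k' = F k') (hFk : F' k = F k ++ [x]) :
    PySem.List.insertBy (fun a b => decide (key a < key b)) x (K.flatMap F) = K.flatMap F' := by
  induction K with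
  | nil => simp at hk
  | cons a K' ih =>
      rcases List.pairwise_cons.mp hK with ⟨ha, hK'⟩
      by_cases hak : a = k
      · subst hak
        rw [List.flatMap_cons, pvInsertBy_skip _ _ _ _ (fun y hy => by
          have h1 := hFkey a y hy
          simp only [decide_eq_false_iff_not, hxk, h1]; omega)]
        rw [pvInsertBy_head _ _ _ (fun y hy => by
          rcases List.mem_flatMap.mp hy with ⟨k', hk', hyk'⟩
          have h1 := hFkey k' y hyk'
          have h2 := ha k' hk'
          simp only [decide_eq_true_eq, hxk, h1]; omega)]
        rw [List.flatMap_cons, hFk]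
        have hcongr : K'.flatMap F' = K'.flatMap F :=
          List.flatMap_congr (fun k' hk' => hF' k' (by have := ha k' hk'; omega))
        rw [hcongr]; simp
      · have hkK' : k ∈ K' := by
          rcases List.mem_cons.mp hk with h | h
          · exact absurd h.symm hak
          · exact h
        have hakk : a < k := ha k hkK'
        rw [List.flatMap_cons, pvInsertBy_skip _ _ _ _ (fun y hy => by
          have h1 := hFkey a y hy
          simp only [decide_eq_false_iff_not, hxk, h1]; omega)]
        rw [ih hK' hkK', List.flatMap_cons, hF' a hak]


theorem pvInsert_new {α : Type} (key : α → Int) (x : α) (k : Int) (hxk : key x = k)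
    (K : List Int) (F F' : Int → List α)
    (hK : K.Pairwise (· < ·)) (hk : k ∉ K)
    (hFkey : ∀ k' y, y ∈ F k' → key y = k')
    (hF' : ∀ k', k' ≠ k → F' k' = F k') (hFk : F' k = F k ++ [x]) (hFke : F k = []) :
    PySem.List.insertBy (fun a b => decide (key a < key b)) x (K.flatMap F)
      = (PySem.List.insertBy (fun a b => decide (a < b)) k K).flatMap F' := by
  induction K with
  | nil => simp [PySem.List.insertBy, hFk, hFke]
  | cons a K' ih =>
      rcases List.pairwise_cons.mp hK with ⟨ha, hK'⟩
      have hak : a ≠ k := fun h => hk (by simp [h])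
      by_cases hka : k < a
      · rw [show PySem.List.insertBy (fun a b => decide (a < b)) k (a :: K')
            = k :: a :: K' by simp [PySem.List.insertBy, hka]]
        rw [List.flatMap_cons, pvInsertBy_head _ _ _ (fun y hy => by
          rcases List.mem_append.mp hy with h | h
          · have h1 := hFkey a y h
            simp only [decide_eq_true_eq, hxk, h1]; omega
          · rcases List.mem_flatMap.mp h with ⟨k', hk', hyk'⟩
            have h1 := hFkey k' y hyk'
            have h2 := ha k' hk'
            simp only [decide_eq_true_eq, hxk, h1]; omega)]
        rw [List.flatMap_cons, List.flatMap_cons, hFk, hFke, hF' a hak]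
        have hcongr : K'.flatMap F' = K'.flatMap F :=
          List.flatMap_congr (fun k' hk' => hF' k' (by have := ha k' hk'; omega))
        rw [hcongr]; simp
      · have hakk : a < k := by omega
        rw [show PySem.List.insertBy (fun a b => decide (a < b)) k (a :: K')
            = a :: PySem.List.insertBy (fun a b => decide (a < b)) k K' by
          simp [PySem.List.insertBy, hka]]
        rw [List.flatMap_cons, pvInsertBy_skip _ _ _ _ (fun y hy => by
          have h1 := hFkey a y hy
          simp only [decide_eq_false_iff_not, hxk, h1]; omega)]
        rw [ih hK' (fun h => hk (by simp [h])), List.flatMap_cons, hF' a hak]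


theorem pvOfList_append_singleton {m : List Int} {k : Int} :
    PySem.Set.ofList (m ++ [k]) = PySem.Set.add (PySem.Set.ofList m) k := by
  rw [PySem.Set.ofList_eq_foldl, PySem.Set.ofList_eq_foldl, List.foldl_append]
  rfl


theorem pvSort_eq (l : List (List Int)) :
    PySem.List.sorted l (fun s => (s.length : Int)) = (pvK l).flatMap (fun k => pvF l k) := by
  induction l using List.reverseRecOn with
  | nil => rfl
  | append_singleton l x ih =>
      rw [pvSorted_append_singleton, ih]
      have hKpw : (pvK l).Pairwise (· < ·) := PySem.List.sorted_ofList_pairwise_lt _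
      have hFkey : ∀ k' (y : List Int), y ∈ pvF l k' → ((y.length : Int)) = k' := by
        intro k' y hy
        have := (List.mem_filter.mp hy).2
        simpa using this
      have hF' : ∀ k', k' ≠ ((x.length : Int)) → pvF (l ++ [x]) k' = pvF l k' := by
        intro k' hne
        unfold pvF
        rw [List.filter_append]
        simp [Ne.symm hne]
      have hFk : pvF (l ++ [x]) ((x.length : Int)) = pvF l ((x.length : Int)) ++ [x] := by
        unfold pvF
        rw [List.filter_append]
        simp
      have hKmem : ∀ k', k' ∈ pvK l ↔ k' ∈ l.map (fun s => (s.length : Int)) := by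
        intro k'
        unfold pvK
        rw [PySem.List.mem_sorted, PySem.Set.mem_ofList]
      by_cases hmem : ((x.length : Int)) ∈ pvK l
      · have hKeq : pvK (l ++ [x]) = pvK l := by
          unfold pvK
          rw [List.map_append, List.map_singleton, pvOfList_append_singleton]
          have hmem' : ((x.length : Int)) ∈ PySem.Set.ofList (l.map (fun s => (s.length : Int))) := by
            rw [PySem.Set.mem_ofList]; exact (hKmem _).mp hmem
          simp [PySem.Set.add, PySem.Set.contains, hmem']
        rw [hKeq]
        exact pvInsert_mem (fun s => ((s.length : Int))) x ((x.length : Int)) rfl (pvK l)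
          (pvF l) (pvF (l ++ [x])) hKpw hmem hFkey hF' hFk
      · have hKeq : pvK (l ++ [x]) = PySem.List.insertBy (fun a b => decide (a < b)) ((x.length : Int)) (pvK l) := by
          unfold pvK
          rw [List.map_append, List.map_singleton, pvOfList_append_singleton]
          have hmem' : ¬ ((x.length : Int)) ∈ PySem.Set.ofList (l.map (fun s => (s.length : Int))) := by
            rw [PySem.Set.mem_ofList]; exact fun h => hmem ((hKmem _).mpr h)
          rw [show PySem.Set.add (PySem.Set.ofList (l.map (fun s => (s.length : Int)))) ((x.length : Int))
              = PySem.Set.ofList (l.map (fun s => (s.length : Int))) ++ [((x.length : Int))] by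
            simp [PySem.Set.add, PySem.Set.contains, hmem']]
          exact pvSorted_append_singleton _ _ _
        rw [hKeq]
        have hFke : pvF l ((x.length : Int)) = [] := by
          unfold pvF
          rw [List.filter_eq_nil_iff]
          intro s hs hbeq
          exact hmem ((hKmem _).mpr (List.mem_map.mpr ⟨s, hs, by simpa using hbeq⟩))
        exact pvInsert_new (fun s => ((s.length : Int))) x ((x.length : Int)) rfl (pvK l)
          (pvF l) (pvF (l ++ [x])) hKpw hmem hFkey hF' hFk hFke


theorem pvGroupBy_flatMap (K : List Int) (F : Int → List (List Int))
    (hK : K.Pairwise (· < ·))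
    (hne : ∀ k ∈ K, F k ≠ [])
    (hFkey : ∀ k ∈ K, ∀ s ∈ F k, (s.length : Int) = k) :
    pvGroupBy (K.flatMap F) = K.map F := by
  induction K with
  | nil => simp [pvGroupBy]
  | cons a K' ih =>
      rcases List.pairwise_cons.mp hK with ⟨ha, hK'⟩
      obtain ⟨x, g, hxg⟩ : ∃ x g, F a = x :: g := by
        cases h : F a with
        | nil => exact absurd h (hne a (by simp))
        | cons x g => exact ⟨x, g, rfl⟩
      have hxa : ((x.length : Int)) = a := hFkey a (by simp) x (by simp [hxg])
      have hgp : ∀ s ∈ g, (s.length == x.length) = true := by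
        intro s hs
        have := hFkey a (by simp) s (by simp [hxg, hs])
        simp only [beq_iff_eq]
        omega
      have hrestp : ∀ s ∈ K'.flatMap F, (s.length == x.length) = false := by
        intro s hs
        rcases List.mem_flatMap.mp hs with ⟨k', hk', hsk'⟩
        have h1 := hFkey k' (by simp [hk']) s hsk'
        have h2 := ha k' hk'
        simp only [beq_eq_false_iff_ne, ne_eq]
        omega
      rw [List.flatMap_cons, hxg, List.cons_append]
      rw [pvGroupBy]
      have htake : (g ++ K'.flatMap F).takeWhile (fun s => s.length == x.length) = g := by
        rw [List.takeWhile_append]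
        rw [List.takeWhile_eq_self_iff.mpr hgp]
        cases h : K'.flatMap F with
        | nil => simp
        | cons r rs =>
            simp only []
            rw [List.takeWhile_cons_of_neg (by
              have := hrestp r (by rw [h]; simp)
              simp [this])]
            simp
      have hdrop : (g ++ K'.flatMap F).dropWhile (fun s => s.length == x.length) = K'.flatMap F := by
        rw [List.dropWhile_append]
        rw [List.dropWhile_eq_nil_iff.mpr hgp]
        cases h : K'.flatMap F with
        | nil => simp
        | cons r rs =>
            simp only [List.isEmpty_nil]
            rw [List.dropWhile_cons_of_neg (by
              have := hrestp r (by rw [h]; simp)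
              simp [this])]
            simp
      rw [htake, hdrop, ih hK' (fun k hk => hne k (by simp [hk])) (fun k hk => hFkey k (by simp [hk]))]
      rw [List.map_cons, hxg]

theorem pvGroup_eq (l : List (List Int)) :
    pvGroupBy ((pvK l).flatMap (fun k => pvF l k)) = (pvK l).map (fun k => pvF l k) := by
  apply pvGroupBy_flatMap
  · exact PySem.List.sorted_ofList_pairwise_lt _
  · intro k hk
    have : k ∈ l.map (fun s => (s.length : Int)) := by
      have := hk
      unfold pvK at this
      rw [PySem.List.mem_sorted, PySem.Set.mem_ofList] at this
      exact this
    rcases List.mem_map.mp this with ⟨s, hs, hsk⟩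
    exact List.ne_nil_of_mem (List.mem_filter.mpr ⟨hs, by simp [hsk]⟩)
  · intro k _ s hs
    have := (List.mem_filter.mp hs).2
    simpa using this

theorem pyRange_neg_step_nil (n bs : Int) (hn : 0 ≤ n) (hbs : bs < 0) :
    PySem.List.pyRange 0 n bs = [] := by
  simp only [PySem.List.pyRange, if_neg (by omega : ¬ bs = 0)]
  rw [if_neg (by omega : ¬ 0 < bs), if_neg (by omega : ¬ n < 0)]
  simp


theorem pvChunk_neg (g : List (List Int)) (bs : Int) (hbs : bs < 0) :
    get_batch_data g bs = pvChunkB g bs := by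
  have hn : (0 : Int) ≤ (g.length : Int) := by positivity
  set n : Int := (g.length : Int) with hndef
  have hq := PySem.Int.floordiv_mul_add_mod n bs
  have hmb := PySem.Int.mod_neg_bounds (a := n) (b := bs) hbs
  have hqle : PySem.Int.floordiv n bs ≤ 0 := by
    by_contra h
    have h1 : 1 ≤ PySem.Int.floordiv n bs := by omega
    have : PySem.Int.floordiv n bs * bs ≤ 1 * bs :=
      mul_le_mul_of_nonpos_right h1 (le_of_lt hbs)
    omega
  have hN : (if ¬ (PySem.Int.mod n bs = 0) then PySem.Int.floordiv n bs + 1 else PySem.Int.floordiv n bs) ≤ 0 := by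
    split_ifs with h
    · exact hqle
    · rcases lt_or_eq_of_le hqle with h2 | h2
      · omega
      · exfalso; rw [h2, zero_mul, zero_add] at hq; omega
  unfold get_batch_data pvChunkB
  simp only [PySem.List.len_eq, ← hndef]
  rw [PySem.List.pyRange_one_eq_nil hN, pyRange_neg_step_nil n bs hn hbs]
  simp


theorem pvChunk_pos (g : List (List Int)) (bs : Int) (hbs : 0 < bs) :
    get_batch_data g bs = pvChunkB g bs := by
  have hn : (0 : Int) ≤ (g.length : Int) := by positivity
  have hd : PySem.Int.floordiv ((g.length : Int)) bs = (g.length : Int) / bs :=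
    PySem.Int.floordiv_eq_ediv_of_pos hbs
  have hm : PySem.Int.mod ((g.length : Int)) bs = (g.length : Int) % bs :=
    PySem.Int.mod_eq_emod_of_pos hbs
  set n : Int := (g.length : Int) with hndef
  have hqr : bs * (n / bs) + n % bs = n := Int.mul_ediv_add_emod n bs
  have hr0 : 0 ≤ n % bs := Int.emod_nonneg n (by omega)
  have hrb : n % bs < bs := Int.emod_lt_of_pos n hbs
  have hq0 : 0 ≤ n / bs := Int.ediv_nonneg hn (le_of_lt hbs)
  have hceil : (n + bs - 1) / bs = (if ¬ (n % bs = 0) then n / bs + 1 else n / bs) := by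
    have h1 : n + bs - 1 = (n % bs + bs - 1) + bs * (n / bs) := by omega
    rw [h1, Int.add_mul_ediv_left _ _ (by omega : bs ≠ 0)]
    by_cases hr : n % bs = 0
    · rw [if_neg (by simpa using hr)]
      rw [hr]; rw [Int.ediv_eq_zero_of_lt (by omega) (by omega)]; omega
    · rw [if_pos hr]
      have h2 : n % bs + bs - 1 = (n % bs - 1) + bs * 1 := by ring
      rw [h2, Int.add_mul_ediv_left _ _ (by omega : bs ≠ 0),
        Int.ediv_eq_zero_of_lt (by omega) (by omega)]
      omega
  have hcount : (if (0:Int) < n then ((n - 0 + bs - 1) / bs).toNat else 0)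
      = ((if ¬ (n % bs = 0) then n / bs + 1 else n / bs) - 0).toNat := by
    simp only [sub_zero]
    by_cases h0 : 0 < n
    · rw [if_pos h0]; omega
    · rw [if_neg h0]
      have hn0 : n = 0 := by omega
      have h00 : n % bs = 0 := by rw [hn0]; exact Int.zero_emod bs
      have h01 : n / bs = 0 := by rw [hn0]; exact Int.zero_ediv bs
      simp [h00, h01]
  unfold get_batch_data pvChunkB
  simp only [PySem.List.len_eq, ← hndef, hd, hm]
  rw [PySem.List.foldl_append_singleton_eq_map, List.nil_append,
    PySem.List.pyRange_one, PySem.List.pyRange_of_pos 0 n hbs, ← hcount]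
  rw [List.map_map, List.map_map]
  apply List.map_congr_left
  intro k hk
  simp only [Function.comp_apply]
  have hm0 : (0:Int) ≤ bs * (k:Int) := by positivity
  have hA : (0 + (k:Int)) * bs = bs * (k:Int) := by ring
  have hB : (0 + (k:Int) + 1) * bs = bs * (k:Int) + bs := by ring
  rw [hA, hB, zero_add]
  set m : Int := bs * (k:Int) with hmdef
  rw [PySem.List.slice_toNat g hm0 (by omega : (0:Int) ≤ min n (m + bs)),
    PySem.List.slice_toNat g hm0 (by omega : (0:Int) ≤ m + bs)]
  by_cases hle : m + bs ≤ n
  · rw [min_eq_right hle]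
  · rw [min_eq_left (by omega)]
    have hlen : (List.drop m.toNat g).length = g.length - m.toNat := List.length_drop
    have hng : n.toNat = g.length := by omega
    rw [List.take_of_length_le (by omega), List.take_of_length_le (by omega)]

theorem pvChunk_eq (g : List (List Int)) (bs : Int) (hbs : bs ≠ 0) :
    get_batch_data g bs = pvChunkB g bs := by
  rcases lt_or_gt_of_ne hbs with h | h
  · exact pvChunk_neg g bs h
  · exact pvChunk_pos g bs h

-- ===== VERDICT (by name: the statement is the Claim_ definition above) =====
theorem construct_batches_by_length_spec : Claim_equal_construct_batches_by_length := by
  intro l bs _ hpre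
  unfold Spec_construct_batches_by_length
  rcases hpre with hnil | hbs
  · subst hnil
    simp [construct_batches_by_length, construct_batches_by_length_alt, pvGroupBy,
      PySem.List.sorted, PySem.Dict.keys_empty]
  · unfold construct_batches_by_length
    simp only []
    rw [pvSort_eq, pvGroup_eq, PySem.List.foldl_append_eq_flatMap, List.nil_append,
      List.flatMap_map, pvB_eq]
    exact List.flatMap_congr (fun k _ => pvChunk_eq _ _ hbs)
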